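-- pv_equiv track=rewrite | github.com/Kasi563/French-GEC-dataset-from-Wikipedia | Dataset cleaning and processing/clean_template.py | get_lang
-- ===== SOURCE A (Python) =====
-- def get_lang(template_word, i):
--     result = ""
--     tag = template_word[:i].lower()
--     if tag == "langue|" or tag == "lang|":
--         param0 = True
--         param = False
--         param2 = False
--         param3 = False
--         p0 = ""
--         p1 = ""
--         p2 = ""
--         p3 = ""
--         for char in template_word[i:]:
--             if char == "|":
--                 if not param:
--                     param = True
--                 elif not param2:
--                     param2 = True
--                 elif not param3:
--                     param3 = True
--             elif param3:
--                 p3 += char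
--             elif param2:
--                 p2 += char
--             elif param:
--                 p1 += char
--             elif param0:
--                 p0 += char
--
--         if p0 == "rtl" or p0 == "ltr":
--             result = p2
--         else:
--             result = p1
--         if p2:
--             if "trans=" in p2:
--                 result += " (" + p2[6:] + ")"
--
--     elif "-" in tag:
--         for char in template_word[i:]:
--             result += char
--
--     if "texte=" in result:
--         return result[6:]
--
--     return result
-- ===== SOURCE B (Python) =====
-- def get_lang(template_word, i):
--     tag = template_word[:i].lower()
--     result = ""
--     if tag in ("langue|", "lang|"):
--         parts = template_word[i:].split("|")
--         p0 = parts[0]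
--         p1 = parts[1] if len(parts) > 1 else ""
--         p2 = parts[2] if len(parts) > 2 else ""
--         result = p2 if p0 in ("rtl", "ltr") else p1
--         if p2 and "trans=" in p2:
--             result += " (" + p2[6:] + ")"
--     elif "-" in tag:
--         result = template_word[i:]
--     return result[6:] if "texte=" in result else result
-- ===== Notes on version B (the rewrite author's own statement) =====
-- stated objective: simpler
-- what changed: A's char-by-char loop with four boolean flags accumulating p0..p3 is replaced by one split('|') of the tail followed by indexing the segment list with '' defaults; the rest of the selection logic is kept.
import Mathlib
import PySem

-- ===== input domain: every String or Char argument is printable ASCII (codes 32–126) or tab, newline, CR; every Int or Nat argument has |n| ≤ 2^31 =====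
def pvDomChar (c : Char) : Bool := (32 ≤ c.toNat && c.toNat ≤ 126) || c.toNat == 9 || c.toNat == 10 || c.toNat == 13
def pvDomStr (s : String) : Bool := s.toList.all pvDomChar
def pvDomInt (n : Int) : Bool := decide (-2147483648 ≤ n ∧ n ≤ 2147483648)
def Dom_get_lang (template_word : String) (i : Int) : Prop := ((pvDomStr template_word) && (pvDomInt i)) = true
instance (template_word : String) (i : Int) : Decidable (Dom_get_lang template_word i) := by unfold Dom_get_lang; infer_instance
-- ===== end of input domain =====

-- B replaces A's char-by-char flag state machine with one split('|') followed by
-- indexing the segment list (with '' defaults); objective: simpler, no speed claim.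

-- ===== PORT A =====
-- loop state of A: the three flags and the four accumulated parameters (param0 is constantly True in A and is omitted)
structure PvStA where
  param : Bool
  param2 : Bool
  param3 : Bool
  p0 : List Char
  p1 : List Char
  p2 : List Char
  p3 : List Char
deriving DecidableEq, Repr

def pvStepA (s : PvStA) (char : Char) : PvStA :=
  if char = '|' then
    if !s.param then { s with param := true }
    else if !s.param2 then { s with param2 := true }
    else if !s.param3 then { s with param3 := true }
    else s
  else if s.param3 then { s with p3 := s.p3 ++ [char] }
  else if s.param2 then { s with p2 := s.p2 ++ [char] }
  else if s.param then { s with p1 := s.p1 ++ [char] }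
  else { s with p0 := s.p0 ++ [char] }

def get_lang (template_word : String) (i : Int) : String :=
  let tw := template_word.toList
  let tag := PySem.Chars.lower (PySem.List.slice tw none (some i))
  let result :=
    if tag = "langue|".toList ∨ tag = "lang|".toList then
      let s := (PySem.List.slice tw (some i) none).foldl pvStepA ⟨false, false, false, [], [], [], []⟩
      let result := if s.p0 = "rtl".toList ∨ s.p0 = "ltr".toList then s.p2 else s.p1
      if s.p2 ≠ [] then
        if PySem.Chars.isIn "trans=".toList s.p2 then
          result ++ (" (".toList ++ PySem.List.slice s.p2 (some 6) none ++ ")".toList)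
        else result
      else result
    else if PySem.Chars.isIn "-".toList tag then
      (PySem.List.slice tw (some i) none).foldl (fun r char => r ++ [char]) []
    else []
  if PySem.Chars.isIn "texte=".toList result then String.ofList (PySem.List.slice result (some 6) none)
  else String.ofList result

-- ===== PORT B =====
def get_lang_alt (template_word : String) (i : Int) : String :=
  let tw := template_word.toList
  let tag := PySem.Chars.lower (PySem.List.slice tw none (some i))
  let result :=
    if tag = "langue|".toList ∨ tag = "lang|".toList then
      let parts := PySem.Chars.splitOn (PySem.List.slice tw (some i) none) "|".toList
      let p0 := parts.getD 0 []   -- parts[0]: str.split never returns an empty list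
      let p1 := if 1 < parts.length then parts.getD 1 [] else []
      let p2 := if 2 < parts.length then parts.getD 2 [] else []
      let result := if p0 = "rtl".toList ∨ p0 = "ltr".toList then p2 else p1
      if p2 ≠ [] ∧ PySem.Chars.isIn "trans=".toList p2 then
        result ++ (" (".toList ++ PySem.List.slice p2 (some 6) none ++ ")".toList)
      else result
    else if PySem.Chars.isIn "-".toList tag then PySem.List.slice tw (some i) none
    else []
  if PySem.Chars.isIn "texte=".toList result then String.ofList (PySem.List.slice result (some 6) none)
  else String.ofList result

-- ===== PRECONDITION & SPEC =====
def Spec_get_lang (template_word : String) (i : Int) (out : String) : Prop := out = get_lang_alt template_word i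
instance (template_word : String) (i : Int) (out : String) : Decidable (Spec_get_lang template_word i out) := by unfold Spec_get_lang; infer_instance

-- ===== CLAIM (what is proved, stated in full; the proofs are below) =====
def Claim_equal_get_lang : Prop := ∀ (template_word : String) (i : Int), Dom_get_lang template_word i → Spec_get_lang template_word i (get_lang template_word i)

-- ===== LEMMAS AND PROOFS =====

-- reference split of a char list on a single character (structural recursion)
def pvSplit (d : Char) (cur : List Char) : List Char → List (List Char)
  | [] => [cur]
  | c :: rest => if c = d then cur :: pvSplit d [] rest else pvSplit d (cur ++ [c]) rest

-- the state A's loop reaches, as a function of the split of the consumed input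
def pvStateOf : List (List Char) → PvStA
  | [] => ⟨false, false, false, [], [], [], []⟩
  | [a] => ⟨false, false, false, a, [], [], []⟩
  | [a, b] => ⟨true, false, false, a, b, [], []⟩
  | [a, b, c] => ⟨true, true, false, a, b, c, []⟩
  | a :: b :: c :: t => ⟨true, true, true, a, b, c, t.flatten⟩

lemma pvStateOf_long (a b c : List Char) (t : List (List Char)) (h : t ≠ []) :
    pvStateOf (a :: b :: c :: t) = ⟨true, true, true, a, b, c, t.flatten⟩ := by
  cases t with
  | nil => exact absurd rfl h
  | cons d t => rfl

lemma pvStepA_stateOf (pre : List (List Char)) (cur : List Char) (c : Char) :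
    pvStepA (pvStateOf (pre ++ [cur])) c =
      if c = '|' then pvStateOf (pre ++ [cur] ++ [[]]) else pvStateOf (pre ++ [cur ++ [c]]) := by
  by_cases hc : c = '|' <;>
    match pre with
    | [] => simp [pvStepA, pvStateOf, hc]
    | [a] => simp [pvStepA, pvStateOf, hc]
    | [a, b] => simp [pvStepA, pvStateOf, hc]
    | a :: b :: c' :: t =>
      rw [show (a :: b :: c' :: t) ++ [cur] = a :: b :: c' :: (t ++ [cur]) by simp,
          show (a :: b :: c' :: (t ++ [cur])) ++ [[]] = a :: b :: c' :: (t ++ [cur] ++ [[]]) by simp,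
          show (a :: b :: c' :: t) ++ [cur ++ [c]] = a :: b :: c' :: (t ++ [cur ++ [c]]) by simp,
          pvStateOf_long a b c' (t ++ [cur]) (by simp),
          pvStateOf_long a b c' (t ++ [cur] ++ [[]]) (by simp),
          pvStateOf_long a b c' (t ++ [cur ++ [c]]) (by simp)]
      simp [pvStepA, hc]

lemma pvFoldl_stateOf (cs : List Char) : ∀ (pre : List (List Char)) (cur : List Char),
    cs.foldl pvStepA (pvStateOf (pre ++ [cur])) = pvStateOf (pre ++ pvSplit '|' cur cs) := by
  induction cs with
  | nil => intro pre cur; simp [pvSplit]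
  | cons c rest ih =>
    intro pre cur
    rw [List.foldl_cons, pvStepA_stateOf]
    by_cases hc : c = '|'
    · simp only [hc, pvSplit]
      have := ih (pre ++ [cur]) []
      simpa using this
    · simp only [pvSplit, hc]
      have := ih pre (cur ++ [c])
      simpa [hc] using this

lemma pvLoopA_eq (cs : List Char) :
    cs.foldl pvStepA ⟨false, false, false, [], [], [], []⟩ = pvStateOf (pvSplit '|' [] cs) := by
  have := pvFoldl_stateOf cs [] []
  simpa [pvStateOf] using this

lemma pvGo (d : Char) (fuel : Nat) : ∀ (l cur : List Char) (acc : List (List Char)),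
    l.length ≤ fuel →
    PySem.Chars.splitOn.go [d] fuel l cur acc = acc.reverse ++ pvSplit d cur.reverse l := by
  induction fuel with
  | zero =>
    intro l cur acc h
    have hl : l = [] := by cases l <;> simp_all
    subst hl
    simp [PySem.Chars.splitOn.go, pvSplit]
  | succ n ih =>
    intro l cur acc h
    cases l with
    | nil => simp [PySem.Chars.splitOn.go, pvSplit]
    | cons c rest =>
      rw [PySem.Chars.splitOn.go]
      by_cases hc : d = c
      · subst hc
        simp only [List.isPrefixOf, BEq.rfl, Bool.true_and, if_pos, List.length_cons] at *
        rw [ih _ _ _ (by simp; omega)]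
        simp [pvSplit]
      · have hp : ([d].isPrefixOf (c :: rest)) = false := by
          simp [List.isPrefixOf, hc]
        simp only [hp, Bool.false_eq_true]
        rw [ih rest (c :: cur) acc (by simp at h ⊢; omega)]
        simp [pvSplit, Ne.symm hc]

lemma pvSplitOn_eq (cs : List Char) : PySem.Chars.splitOn cs ['|'] = pvSplit '|' [] cs := by
  have := pvGo '|' (cs.length + 1) cs [] [] (by omega)
  simpa [PySem.Chars.splitOn] using this

-- the fields of pvStateOf are exactly B's indexed lookups with '' defaults
lemma pvStateOf_p0 (parts : List (List Char)) : (pvStateOf parts).p0 = parts.getD 0 [] := by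
  match parts with
  | [] | [_] | [_, _] | [_, _, _] | _ :: _ :: _ :: _ :: _ => simp [pvStateOf, List.getD]

lemma pvStateOf_p1 (parts : List (List Char)) :
    (pvStateOf parts).p1 = (if 1 < parts.length then parts.getD 1 [] else []) := by
  match parts with
  | [] | [_] | [_, _] | [_, _, _] | _ :: _ :: _ :: _ :: _ => simp [pvStateOf, List.getD]

lemma pvStateOf_p2 (parts : List (List Char)) :
    (pvStateOf parts).p2 = (if 2 < parts.length then parts.getD 2 [] else []) := by
  match parts with
  | [] | [_] | [_, _] | [_, _, _] | _ :: _ :: _ :: _ :: _ => simp [pvStateOf, List.getD]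

lemma pvFlatten_singleton (l : List Char) : (List.map (fun x2 => [x2]) l).flatten = l := by
  rw [← List.flatMap_def]; exact List.flatMap_singleton' l

-- ===== VERDICT (by name: the statement is the Claim_ definition above) =====
theorem get_lang_spec : Claim_equal_get_lang := by
  intro template_word i _
  unfold Spec_get_lang get_lang get_lang_alt
  simp only [pvLoopA_eq, show ("|".toList) = ['|'] from rfl, pvSplitOn_eq,
             pvStateOf_p0, pvStateOf_p1, pvStateOf_p2]
  split_ifs <;> simp_all [pvFlatten_singleton]
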